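-- pv_equiv track=rewrite | github.com/KushagraSrivastava001/LeetcodeSolutionsInPython | sparse.py | isSparse
-- ===== SOURCE A (Python) =====
-- def isSparse(n):
--     #Your code here
--     count=0
--     while n>0:
--         if n%2==1:
--             count+=1
--         else:
--             count=0
--         if count>=2:
--             return False
--             break
--         n=n>>1
--     return True
-- ===== SOURCE B (Python) =====
-- def isSparse(n):
--     # Closed-form: adjacent set bits exist iff n AND (n>>1) is nonzero.
--     # For n <= 0 the original loop never runs and answers True.
--     return n <= 0 or (n & (n >> 1)) == 0
-- ===== Notes on version B (the rewrite author's own statement) =====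
-- stated objective: idiomatic
-- what changed: Replaced the per-bit while-loop with consecutive-ones counter by the closed-form bitwise test n & (n >> 1) == 0 (guarded by n <= 0 where the loop never runs).
import Mathlib
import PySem

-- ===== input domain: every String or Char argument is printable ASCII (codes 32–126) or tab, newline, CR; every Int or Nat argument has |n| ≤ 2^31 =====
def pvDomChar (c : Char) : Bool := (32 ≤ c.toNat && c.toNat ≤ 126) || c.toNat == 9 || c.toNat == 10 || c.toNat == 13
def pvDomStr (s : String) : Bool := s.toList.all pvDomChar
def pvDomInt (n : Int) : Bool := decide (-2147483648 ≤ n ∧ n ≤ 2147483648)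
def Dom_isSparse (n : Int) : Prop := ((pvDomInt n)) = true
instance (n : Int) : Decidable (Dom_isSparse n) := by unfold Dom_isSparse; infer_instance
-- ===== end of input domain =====

-- B replaces A's bit-by-bit counting loop by the closed-form test n & (n >> 1) == 0 (idiomatic).

-- termination helper for the loop below (cited by decreasing_by)
theorem pvShiftToNatLt (n : Int) (h : 0 < n) : (n >>> (1 : Nat)).toNat < n.toNat := by
  obtain ⟨a, rfl⟩ := Int.eq_ofNat_of_zero_le h.le
  rw [show ((a : Int) >>> (1 : Nat)) = ↑(a >>> 1) from (Int.natCast_shiftRight a 1).symm]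
  simp [Nat.shiftRight_one]
  omega

-- ===== PORT A =====
-- literal port of A's while-loop; `count` is the running count of consecutive 1-bits
def isSparseLoop (n : Int) (count : Int) : Bool :=
  if h : 0 < n then
    let count' := if n % 2 = 1 then count + 1 else (0 : Int)
    if count' ≥ 2 then false
    else isSparseLoop (n >>> (1 : Nat)) count'
  else true
termination_by n.toNat
decreasing_by exact pvShiftToNatLt n h

def isSparse (n : Int) : Bool := isSparseLoop n 0

-- ===== PORT B =====
-- port of Source B: n <= 0 or (n & (n >> 1)) == 0
def isSparse_alt (n : Int) : Bool := decide (n ≤ 0) || decide (Int.land n (n >>> (1 : Nat)) = 0)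

-- ===== PRECONDITION & SPEC =====
def Spec_isSparse (n : Int) (out : Bool) : Prop := out = isSparse_alt n
instance (n : Int) (out : Bool) : Decidable (Spec_isSparse n out) := by unfold Spec_isSparse; infer_instance

-- ===== CLAIM (what is proved, stated in full; the proofs are below) =====
def Claim_equal_isSparse : Prop := ∀ (n : Int), Dom_isSparse n → Spec_isSparse n (isSparse n)

-- ===== LEMMAS AND PROOFS =====

-- "no two adjacent set bits"
def NoAdj (a : Nat) : Prop := ∀ i, ¬(a.testBit i = true ∧ a.testBit (i + 1) = true)

theorem noAdj_zero : NoAdj 0 := by intro i ⟨h, _⟩; simp [Nat.zero_testBit] at h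

theorem noAdj_rec (a : Nat) :
    NoAdj a ↔ (¬(a.testBit 0 = true ∧ a.testBit 1 = true)) ∧ NoAdj (a / 2) := by
  constructor
  · intro h
    refine ⟨h 0, fun i ⟨h1, h2⟩ => ?_⟩
    exact h (i + 1) ⟨by rw [Nat.testBit_succ]; exact h1, by rw [Nat.testBit_succ]; exact h2⟩
  · rintro ⟨h0, h⟩ i ⟨h1, h2⟩
    cases i with
    | zero => exact h0 ⟨h1, h2⟩
    | succ j =>
      exact h j ⟨by rw [← Nat.testBit_succ]; exact h1, by rw [← Nat.testBit_succ]; exact h2⟩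

theorem and_shift_eq_zero_iff (a : Nat) : a &&& (a >>> 1) = 0 ↔ NoAdj a := by
  constructor
  · intro h i ⟨h1, h2⟩
    have := congrArg (fun x => x.testBit i) h
    simp [Nat.testBit_and, Nat.testBit_shiftRight, Nat.zero_testBit,
      Nat.add_comm 1 i] at this
    exact absurd (this h1) (by simp [h2])
  · intro h
    apply Nat.eq_of_testBit_eq
    intro i
    simp [Nat.testBit_and, Nat.testBit_shiftRight, Nat.zero_testBit, Nat.add_comm 1 i]
    intro h1
    by_contra h2
    exact h i ⟨h1, by simpa using h2⟩

theorem natCast_mod_two_eq_one (a : Nat) : ((a : Int) % 2 = 1) ↔ a % 2 = 1 := by omega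

theorem testBit_zero_iff (a : Nat) : a.testBit 0 = true ↔ a % 2 = 1 := by
  simp [Nat.testBit_zero]

theorem testBit_one_iff (a : Nat) : a.testBit 1 = true ↔ (a / 2) % 2 = 1 := by
  rw [show (1 : Nat) = Nat.succ 0 from rfl, Nat.testBit_succ]
  simp [Nat.testBit_zero]

theorem loop_nat (a : Nat) :
    (isSparseLoop (↑a) 0 = true ↔ NoAdj a) ∧
    (isSparseLoop (↑a) 1 = true ↔ (a % 2 = 0 ∧ NoAdj a)) := by
  induction a using Nat.strong_induction_on with
  | _ a ih =>
    by_cases ha : a = 0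
    · subst ha
      constructor
      · rw [isSparseLoop]; simp [noAdj_zero]
      · rw [isSparseLoop]; simp [noAdj_zero]
    · have hpos : (0 : Int) < ↑a := by exact_mod_cast Nat.pos_of_ne_zero ha
      have hsh : ((a : Int) >>> (1 : Nat)) = ↑(a / 2) := by
        rw [show ((a : Int) >>> (1 : Nat)) = ↑(a >>> 1) from (Int.natCast_shiftRight a 1).symm]
        simp [Nat.shiftRight_one]
      have ihd := ih (a / 2) (Nat.div_lt_self (Nat.pos_of_ne_zero ha) one_lt_two)
      have hrec := noAdj_rec a
      by_cases hodd : a % 2 = 1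
      · -- a odd: testBit a 0 = true
        have hb0 : a.testBit 0 = true := (testBit_zero_iff a).mpr hodd
        constructor
        · rw [isSparseLoop]
          simp only [hpos, dif_pos, (natCast_mod_two_eq_one a).mpr hodd, if_pos]
          have : ¬((0 : Int) + 1 ≥ 2) := by omega
          simp only [this, hsh, if_false]
          rw [show (0 : Int) + 1 = 1 by ring, ihd.2, hrec]
          constructor
          · rintro ⟨h1, h2⟩
            refine ⟨fun ⟨_, hb1⟩ => ?_, h2⟩
            rw [testBit_one_iff] at hb1; omega
          · rintro ⟨h1, h2⟩
            refine ⟨?_, h2⟩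
            have : ¬ a.testBit 1 = true := fun hb1 => h1 ⟨hb0, hb1⟩
            rw [testBit_one_iff] at this; omega
        · rw [isSparseLoop]
          simp only [hpos, dif_pos, (natCast_mod_two_eq_one a).mpr hodd, if_pos]
          have : ((1 : Int) + 1 ≥ 2) := by omega
          simp only [this, if_pos]
          constructor
          · intro h; exact absurd h (by simp)
          · rintro ⟨h1, _⟩; omega
      · -- a even
        have heven : a % 2 = 0 := by omega
        have hb0 : ¬ a.testBit 0 = true := by rw [testBit_zero_iff]; omega
        have hmod : ¬ ((a : Int) % 2 = 1) := by rw [natCast_mod_two_eq_one]; omega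
        have hnoadj : NoAdj a ↔ NoAdj (a / 2) := by
          rw [hrec]
          constructor
          · exact fun ⟨_, h⟩ => h
          · exact fun h => ⟨fun ⟨h0, _⟩ => hb0 h0, h⟩
        constructor
        · rw [isSparseLoop]
          simp only [hpos, dif_pos, hmod, if_neg]
          have : ¬((0 : Int) ≥ 2) := by omega
          simp only [this, hsh, if_false]
          rw [ihd.1, hnoadj]
        · rw [isSparseLoop]
          simp only [hpos, dif_pos, hmod, if_neg]
          have : ¬((0 : Int) ≥ 2) := by omega
          simp only [this, hsh, if_false]
          rw [ihd.1, hnoadj]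
          exact ⟨fun h => ⟨heven, h⟩, fun ⟨_, h⟩ => h⟩

-- ===== VERDICT (by name: the statement is the Claim_ definition above) =====
theorem isSparse_spec : Claim_equal_isSparse := by
  intro n _
  unfold Spec_isSparse isSparse isSparse_alt
  by_cases h : n ≤ 0
  · rw [isSparseLoop]
    simp [h, show ¬ (0 : Int) < n by omega]
  · have hpos : 0 < n := by omega
    obtain ⟨a, rfl⟩ := Int.eq_ofNat_of_zero_le hpos.le
    have hsh : ((a : Int) >>> (1 : Nat)) = ↑(a >>> 1) := (Int.natCast_shiftRight a 1).symm
    have hland : Int.land (↑a) ((a : Int) >>> (1 : Nat)) = ↑(a &&& (a >>> 1)) := by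
      rw [hsh]; rfl
    rw [Bool.eq_iff_iff]
    simp only [hland, h, decide_false, Bool.false_or, decide_eq_true_eq]
    rw [(loop_nat a).1, ← and_shift_eq_zero_iff]
    exact_mod_cast Iff.rfl
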